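-- pv_equiv track=rewrite | github.com/billsioros/kenken-python | src/kenken.py | gneighbors
-- ===== SOURCE A (Python) =====
-- def RowXorCol(xy1, xy2):
--     """
--     Evaluates to true if the given positions are in the same row / column
--     but are in different columns / rows
--     """
--     return (xy1[0] == xy2[0]) != (xy1[1] == xy2[1])
--
-- def conflicting(A, a, B, b):
--     """
--     Evaluates to true if:
--       * there exists mA so that ma is a member of A and
--       * there exists mb so that mb is a member of B and
--       * RowXorCol(mA, mB) evaluates to true and
--       * the value of mA in 'assignment' a is equal to
--         the value of mb in 'assignment' b
--     """
--     for i in range(len(A)):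
--         for j in range(len(B)):
--             mA = A[i]
--             mB = B[j]
--
--             ma = a[i]
--             mb = b[j]
--             if RowXorCol(mA, mB) and ma == mb:
--                 return True
--
--     return False
--
-- def gneighbors(cliques):
--     """
--     Determine the neighbors of each variable for the given puzzle
--         For every clique in cliques
--         * Initialize its neighborhood as empty
--         * For every clique in cliques other than the clique at hand,
--             if they are probable to 'conflict' they are considered neighbors
--     """
--     neighbors = {}
--     for members, _, _ in cliques:
--         neighbors[members] = []
--
--     for A, _, _ in cliques:
--         for B, _, _ in cliques:
--             if A != B and B not in neighbors[A]:
--                 if conflicting(A, [-1] * len(A), B, [-1] * len(B)):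
--                     neighbors[A].append(B)
--                     neighbors[B].append(A)
--
--     return neighbors
-- ===== SOURCE B (Python) =====
-- def gneighbors(cliques):
--     """Conflict-neighbor lists: index each clique's occupied lines once
--     (row -> columns, column -> rows); a clique M conflicts with N iff some
--     cell of M hits a line of N at a different coordinate."""
--     keys = list(dict.fromkeys(m for m, _, _ in cliques))
--     rowmaps = {}
--     colmaps = {}
--     for N in keys:
--         rm = {}
--         cm = {}
--         for r, c in N:
--             rm.setdefault(r, []).append(c)
--             cm.setdefault(c, []).append(r)
--         rowmaps[N] = rm
--         colmaps[N] = cm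
--
--     def hits(M, N):
--         rm, cm = rowmaps[N], colmaps[N]
--         return any(any(c != pc for c in rm.get(pr, ()))
--                    or any(r != pr for r in cm.get(pc, ()))
--                    for pr, pc in M)
--
--     return {M: [N for N in keys if N != M and hits(M, N)] for M in keys}
-- ===== Notes on version B (the rewrite author's own statement) =====
-- stated objective: faster
-- what changed: B replaces A's mutation-based dict dance (full double loop with membership-list dedup, symmetric appends and a quadratic pairwise cell product per pair) by a dedup of the member lists followed by per-clique row->columns / column->rows line indexes, so the conflict test scans only the cells of one clique and looks up lines of the other.
import Mathlib
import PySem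

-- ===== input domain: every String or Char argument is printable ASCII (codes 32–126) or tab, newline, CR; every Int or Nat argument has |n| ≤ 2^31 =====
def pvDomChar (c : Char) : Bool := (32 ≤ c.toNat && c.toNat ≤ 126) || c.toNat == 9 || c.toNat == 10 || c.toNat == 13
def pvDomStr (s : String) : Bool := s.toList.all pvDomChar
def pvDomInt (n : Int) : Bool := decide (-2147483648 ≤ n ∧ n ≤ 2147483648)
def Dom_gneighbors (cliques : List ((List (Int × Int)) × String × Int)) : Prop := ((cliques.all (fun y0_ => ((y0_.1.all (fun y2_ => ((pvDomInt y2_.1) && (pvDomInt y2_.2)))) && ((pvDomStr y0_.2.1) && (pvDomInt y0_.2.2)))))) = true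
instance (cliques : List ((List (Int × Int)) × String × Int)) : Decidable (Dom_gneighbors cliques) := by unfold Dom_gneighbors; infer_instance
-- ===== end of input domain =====

-- B replaces A's mutating dict double loop + quadratic per-pair cell product by dedup'd keys with
-- per-clique row->columns / column->rows line indexes; measured faster (asymptotic in clique size).

-- ===== PORT A =====
def rowXorCol (xy1 xy2 : Int × Int) : Bool :=
  (xy1.1 == xy2.1) != (xy1.2 == xy2.2)

def conflicting (A : List (Int × Int)) (a : List Int) (B : List (Int × Int)) (b : List Int) : Bool :=
  (PySem.List.pyRange 0 (A.length : Int) 1).any (fun i =>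
    (PySem.List.pyRange 0 (B.length : Int) 1).any (fun j =>
      -- A[i], B[j], a[i], b[j]: indices produced by range(len(·)) are always in range,
      -- so the `none` (IndexError) branch is unreachable
      match PySem.List.pyGet? A i, PySem.List.pyGet? B j, PySem.List.pyGet? a i, PySem.List.pyGet? b j with
      | some mA, some mB, some ma, some mb => rowXorCol mA mB && (ma == mb)
      | _, _, _, _ => false))

def gneighbors (cliques : List ((List (Int × Int)) × String × Int)) : List (List (Int × Int) × List (List (Int × Int))) :=
  let d0 : PySem.Dict (List (Int × Int)) (List (List (Int × Int))) :=
    cliques.foldl (fun d c => d.insert c.1 []) PySem.Dict.empty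
  let d1 := cliques.foldl (fun d c =>
    cliques.foldl (fun d c' =>
      -- neighbors[A] : A is always a key of the dict, so getD's default is never taken
      if c.1 != c'.1 && !((d.getD c.1 []).contains c'.1) then
        if conflicting c.1 (List.replicate c.1.length (-1)) c'.1 (List.replicate c'.1.length (-1)) then
          (d.modify c.1 [] (· ++ [c'.1])).modify c'.1 [] (· ++ [c.1])
        else d
      else d) d) d0
  d1.items

-- ===== PORT B =====
-- rm.setdefault(r, []).append(c)  ==  rm[r] = rm.get(r, []) + [c]  ==  Dict.modify
def mkRowMap (N : List (Int × Int)) : PySem.Dict Int (List Int) :=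
  N.foldl (fun d p => d.modify p.1 [] (· ++ [p.2])) PySem.Dict.empty

def mkColMap (N : List (Int × Int)) : PySem.Dict Int (List Int) :=
  N.foldl (fun d p => d.modify p.2 [] (· ++ [p.1])) PySem.Dict.empty

def hits (rm cm : PySem.Dict Int (List Int)) (M : List (Int × Int)) : Bool :=
  M.any (fun p =>
    ((rm.getD p.1 []).any (fun c => c != p.2)) || ((cm.getD p.2 []).any (fun r => r != p.1)))

def gneighbors_alt (cliques : List ((List (Int × Int)) × String × Int)) : List (List (Int × Int) × List (List (Int × Int))) :=
  let keys := PySem.List.dedup (cliques.map (fun c => c.1))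
  let rowmaps := keys.foldl (fun d N => d.insert N (mkRowMap N)) PySem.Dict.empty
  let colmaps := keys.foldl (fun d N => d.insert N (mkColMap N)) PySem.Dict.empty
  keys.map (fun M =>
    (M, keys.filter (fun N =>
      N != M && hits (rowmaps.getD N PySem.Dict.empty) (colmaps.getD N PySem.Dict.empty) M)))

-- ===== PRECONDITION & SPEC =====
def Spec_gneighbors (cliques : List ((List (Int × Int)) × String × Int)) (out : List (List (Int × Int) × List (List (Int × Int)))) : Prop := out = gneighbors_alt cliques
instance (cliques : List ((List (Int × Int)) × String × Int)) (out : List (List (Int × Int) × List (List (Int × Int)))) : Decidable (Spec_gneighbors cliques out) := by unfold Spec_gneighbors; infer_instance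

-- ===== CLAIM (what is proved, stated in full; the proofs are below) =====
def Claim_equal_gneighbors : Prop := ∀ (cliques : List ((List (Int × Int)) × String × Int)), Dom_gneighbors cliques → Spec_gneighbors cliques (gneighbors cliques)

-- ===== LEMMAS AND PROOFS =====

-- the conflict relation both programs decide: some cell of M and some cell of N
-- share exactly one coordinate ('conflicting' with the all-(-1) assignments, 'hits' with the line maps)
def cf (M N : List (Int × Int)) : Bool := M.any (fun p => N.any (fun q => rowXorCol p q))

-- the final neighbor row of M over key list K
def rowFull (K : List (List (Int × Int))) (M : List (Int × Int)) : List (List (Int × Int)) :=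
  K.filter (fun N => N != M && cf M N)

-- A's inner-loop body, with the conflict test abbreviated to cf (= conflicting_eq)
def stepB (A : List (Int × Int))
    (d : PySem.Dict (List (Int × Int)) (List (List (Int × Int)))) (B : List (Int × Int)) :
    PySem.Dict (List (Int × Int)) (List (List (Int × Int))) :=
  if A != B && !((d.getD A []).contains B) then
    if cf A B then (d.modify A [] (· ++ [B])).modify B [] (· ++ [A]) else d
  else d

-- state of A's dict after the outer loop has fully processed cliques whose members give K.take m
def OuterInv (K : List (List (Int × Int))) (m : Nat)
    (d : PySem.Dict (List (Int × Int)) (List (List (Int × Int)))) : Prop :=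
  d.keys = K ∧ ∀ (i : Nat) (h : i < K.length),
    d.getD K[i] [] = if i < m then rowFull K K[i] else rowFull (K.take m) K[i]

-- state mid-way through the inner loop at the (first occurrence of the) outer member A = K[m],
-- after the inner scan has covered members giving K.take s (s ≥ m)
def InnerInv (K : List (List (Int × Int))) (A : List (Int × Int)) (m s : Nat)
    (d : PySem.Dict (List (Int × Int)) (List (List (Int × Int)))) : Prop :=
  d.keys = K ∧ ∀ (i : Nat) (h : i < K.length),
    d.getD K[i] [] =
      if i < m then rowFull K K[i]
      else if i = m then rowFull (K.take s) A
      else if i < s then rowFull (K.take m) K[i] ++ (if cf K[i] A then [A] else [])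
      else rowFull (K.take m) K[i]

lemma rowXorCol_symm (p q : Int × Int) : rowXorCol p q = rowXorCol q p := by
  have h1 : (p.1 == q.1) = (q.1 == p.1) := by simp [eq_comm]
  have h2 : (p.2 == q.2) = (q.2 == p.2) := by simp [eq_comm]
  simp only [rowXorCol]
  rw [h1, h2]


lemma cf_symm (M N : List (Int × Int)) : cf M N = cf N M := by
  rw [Bool.eq_iff_iff]
  simp only [cf, List.any_eq_true]
  constructor
  · rintro ⟨p, hp, q, hq, h⟩
    exact ⟨q, hq, p, hp, by rw [rowXorCol_symm]; exact h⟩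
  · rintro ⟨p, hp, q, hq, h⟩
    exact ⟨q, hq, p, hp, by rw [rowXorCol_symm]; exact h⟩


lemma mem_rowFull (K : List (List (Int × Int))) (M N : List (Int × Int)) :
    N ∈ rowFull K M ↔ N ∈ K ∧ N ≠ M ∧ cf M N = true := by
  simp only [rowFull, List.mem_filter, Bool.and_eq_true, bne_iff_ne]


lemma rowFull_append (K : List (List (Int × Int))) (x M : List (Int × Int)) :
    rowFull (K ++ [x]) M = rowFull K M ++ (if x ≠ M ∧ cf M x = true then [x] else []) := by
  simp only [rowFull, List.filter_append, List.filter_singleton]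
  congr 1
  by_cases h1 : x = M <;> by_cases h2 : cf M x = true <;>
    simp [h1, h2, Bool.cond_eq_ite, bne_iff_ne]


lemma take_succ_concat (K : List (List (Int × Int))) (t : Nat) (h : t < K.length) :
    K.take (t+1) = K.take t ++ [K[t]] := by
  rw [List.take_add_one, List.getElem?_eq_getElem h]; rfl

lemma conflicting_eq (A B : List (Int × Int)) :
    conflicting A (List.replicate A.length (-1)) B (List.replicate B.length (-1)) = cf A B := by
  rw [Bool.eq_iff_iff]
  simp only [conflicting, cf, List.any_eq_true]
  constructor
  · rintro ⟨i, hi, j, hj, h⟩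
    rw [PySem.List.mem_pyRange_one] at hi hj
    obtain ⟨hi0, hi1⟩ := hi
    obtain ⟨hj0, hj1⟩ := hj
    lift i to ℕ using hi0 with ni
    lift j to ℕ using hj0 with nj
    have hA : ni < A.length := by exact_mod_cast hi1
    have hB : nj < B.length := by exact_mod_cast hj1
    have hA' : ni < (List.replicate A.length (-1 : Int)).length := by simpa using hA
    have hB' : nj < (List.replicate B.length (-1 : Int)).length := by simpa using hB
    rw [PySem.List.pyGet?_natCast, PySem.List.pyGet?_natCast, PySem.List.pyGet?_natCast,
        PySem.List.pyGet?_natCast, List.getElem?_eq_getElem hA, List.getElem?_eq_getElem hB,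
        List.getElem?_eq_getElem hA', List.getElem?_eq_getElem hB'] at h
    simp only [List.getElem_replicate] at h
    refine ⟨A[ni], List.getElem_mem hA, B[nj], List.getElem_mem hB, ?_⟩
    simpa using h
  · rintro ⟨p, hp, q, hq, h⟩
    obtain ⟨ni, hA, rfl⟩ := List.mem_iff_getElem.mp hp
    obtain ⟨nj, hB, rfl⟩ := List.mem_iff_getElem.mp hq
    refine ⟨(ni : Int), ?_, (nj : Int), ?_, ?_⟩
    · rw [PySem.List.mem_pyRange_one]; exact ⟨Int.natCast_nonneg ni, by exact_mod_cast hA⟩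
    · rw [PySem.List.mem_pyRange_one]; exact ⟨Int.natCast_nonneg nj, by exact_mod_cast hB⟩
    · have hA' : ni < (List.replicate A.length (-1 : Int)).length := by simpa using hA
      have hB' : nj < (List.replicate B.length (-1 : Int)).length := by simpa using hB
      rw [PySem.List.pyGet?_natCast, PySem.List.pyGet?_natCast, PySem.List.pyGet?_natCast,
          PySem.List.pyGet?_natCast, List.getElem?_eq_getElem hA, List.getElem?_eq_getElem hB,
          List.getElem?_eq_getElem hA', List.getElem?_eq_getElem hB']
      simpa using h


lemma hits_eq (M N : List (Int × Int)) : hits (mkRowMap N) (mkColMap N) M = cf M N := by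
  have hrow : ∀ r, (mkRowMap N).getD r [] = ((N.filter (fun q => q.1 == r)).map (fun q => q.2)) := by
    intro r
    unfold mkRowMap
    rw [PySem.Dict.getD_foldl_modify_append]
    simp
  have hcol : ∀ c, (mkColMap N).getD c [] = ((N.filter (fun q => q.2 == c)).map (fun q => q.1)) := by
    intro c
    have hswap : mkColMap N
        = ((N.map (fun p => (p.2, p.1))).foldl (fun d p => d.modify p.1 [] (· ++ [p.2])) PySem.Dict.empty) := by
      rw [List.foldl_map]; rfl
    rw [hswap, PySem.Dict.getD_foldl_modify_append]
    simp [List.filter_map, List.map_map, Function.comp_def]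
  rw [Bool.eq_iff_iff]
  simp only [hits, List.any_eq_true, hrow, hcol, Bool.or_eq_true, cf, List.mem_map,
    List.mem_filter, bne_iff_ne, beq_iff_eq]
  constructor
  · rintro ⟨p, hp, H⟩
    rcases H with ⟨c, ⟨q, ⟨hq, h1⟩, h2⟩, h3⟩ | ⟨r, ⟨q, ⟨hq, h1⟩, h2⟩, h3⟩
    · subst h2
      refine ⟨p, hp, q, hq, ?_⟩
      have h3' : p.2 ≠ q.2 := fun h => h3 (h.symm)
      simp [rowXorCol, h1, h3']
    · subst h2
      refine ⟨p, hp, q, hq, ?_⟩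
      have h3' : p.1 ≠ q.1 := fun h => h3 (h.symm)
      simp [rowXorCol, h1, h3']
  · rintro ⟨p, hp, q, hq, h⟩
    refine ⟨p, hp, ?_⟩
    by_cases hr : p.1 = q.1 <;> by_cases hc : p.2 = q.2
    · exfalso; simp [rowXorCol, hr, hc] at h
    · exact Or.inl ⟨q.2, ⟨q, ⟨hq, hr.symm⟩, rfl⟩, fun h' => hc h'.symm⟩
    · exact Or.inr ⟨q.1, ⟨q, ⟨hq, hc.symm⟩, rfl⟩, fun h' => hr h'.symm⟩
    · exfalso; simp [rowXorCol, hr, hc] at h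


lemma getD_insertmap_of_not_mem {ν : Type} (f : List (Int × Int) → ν)
    (l : List (List (Int × Int))) (d : PySem.Dict (List (Int × Int)) ν) (e : ν)
    (k : List (Int × Int)) (hk : k ∉ l) :
    (l.foldl (fun d x => d.insert x (f x)) d).getD k e = d.getD k e := by
  induction l generalizing d with
  | nil => rfl
  | cons x tl ih =>
    have hx : k ≠ x := fun h => hk (h ▸ List.mem_cons_self ..)
    have htl : k ∉ tl := fun h => hk (List.mem_cons_of_mem _ h)
    simp only [List.foldl_cons]
    rw [ih _ htl, PySem.Dict.getD_insert]
    simp [hx]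


lemma getD_insertmap_self {ν : Type} (f : List (Int × Int) → ν)
    (l : List (List (Int × Int))) (d : PySem.Dict (List (Int × Int)) ν) (e : ν)
    (k : List (Int × Int)) (hk : k ∈ l) :
    (l.foldl (fun d x => d.insert x (f x)) d).getD k e = f k := by
  induction l generalizing d with
  | nil => exact absurd hk (List.not_mem_nil)
  | cons x tl ih =>
    simp only [List.foldl_cons]
    by_cases htl : k ∈ tl
    · exact ih _ htl
    · have hx : k = x := by
        rcases List.mem_cons.mp hk with h | h
        · exact h
        · exact absurd h htl
      subst hx
      rw [getD_insertmap_of_not_mem f tl _ e k htl, PySem.Dict.getD_insert]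
      simp


lemma alt_eq (cliques : List ((List (Int × Int)) × String × Int)) :
    gneighbors_alt cliques =
      (PySem.List.dedup (cliques.map (fun c => c.1))).map
        (fun M => (M, rowFull (PySem.List.dedup (cliques.map (fun c => c.1))) M)) := by
  unfold gneighbors_alt
  refine List.map_congr_left (fun M hM => ?_)
  refine congrArg (fun l => (M, l)) ?_
  refine List.filter_congr (fun N hN => ?_)
  rw [getD_insertmap_self (fun N => mkRowMap N) _ _ _ N hN,
      getD_insertmap_self (fun N => mkColMap N) _ _ _ N hN, hits_eq]


lemma stepB_eq_self (A B : List (Int × Int))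
    (d : PySem.Dict (List (Int × Int)) (List (List (Int × Int))))
    (h : A = B ∨ (cf A B = true → (d.getD A []).contains B = true)) : stepB A d B = d := by
  unfold stepB
  rcases h with rfl | h
  · simp
  · by_cases hc : (d.getD A []).contains B = true
    · have hfalse : (A != B && !((d.getD A []).contains B)) = false := by
        rw [hc]; simp
      simp only [hfalse]
      simp
    · have hcf : cf A B = false := by
        cases hcf : cf A B
        · rfl
        · exact absurd (h hcf) hc
      simp [hcf]


lemma phase1_keys (cliques : List ((List (Int × Int)) × String × Int)) :
    (cliques.foldl (fun d c => d.insert c.1 ([] : List (List (Int × Int)))) PySem.Dict.empty).keys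
      = PySem.List.dedup (cliques.map (fun c => c.1)) := by
  rw [PySem.Dict.keys_foldl_insert_key cliques (fun c => c.1) (fun _ _ => []) PySem.Dict.empty]
  simp [PySem.Set.update_nil_left, PySem.List.dedup_eq_ofList]


lemma phase1_getD (cliques : List ((List (Int × Int)) × String × Int)) (M : List (Int × Int)) :
    (cliques.foldl (fun d c => d.insert c.1 ([] : List (List (Int × Int)))) PySem.Dict.empty).getD M [] = [] := by
  have aux : ∀ (l : List ((List (Int × Int)) × String × Int))
      (d : PySem.Dict (List (Int × Int)) (List (List (Int × Int)))),
      (∀ N, d.getD N [] = []) →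
      ∀ M, (l.foldl (fun d c => d.insert c.1 []) d).getD M [] = [] := by
    intro l
    induction l with
    | nil => intro d hd M; simpa using hd M
    | cons c tl ih =>
      intro d hd M
      simp only [List.foldl_cons]
      refine ih _ (fun N => ?_) M
      rw [PySem.Dict.getD_insert]
      split
      · rfl
      · exact hd N
  exact aux cliques _ (fun N => PySem.Dict.getD_empty N []) M


lemma not_mem_take_self (K : List (List (Int × Int))) (hK : K.Nodup) (t : Nat) (ht : t < K.length) :
    K[t] ∉ K.take t := by
  intro hmem
  rw [List.mem_take_iff_getElem] at hmem
  obtain ⟨j, hj, he⟩ := hmem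
  have hjt : j < t := lt_of_lt_of_le hj (min_le_left _ _)
  have : j = t := hK.getElem_inj_iff.mp he
  omega


lemma inner_work (K : List (List (Int × Int))) (hK : K.Nodup) (m t : Nat)
    (hm : m < K.length) (ht : t < K.length) (hmt : m < t)
    (d : PySem.Dict (List (Int × Int)) (List (List (Int × Int))))
    (hd : InnerInv K K[m] m t d) : InnerInv K K[m] m (t+1) (stepB K[m] d K[t]) := by
  obtain ⟨hkeys, hrows⟩ := hd
  have hAB : K[m] ≠ K[t] := fun h => absurd (hK.getElem_inj_iff.mp h) (by omega)
  have hrowA : d.getD K[m] [] = rowFull (K.take t) K[m] := by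
    have h := hrows m hm
    simpa using h
  have hBnotin : K[t] ∉ d.getD K[m] [] := by
    rw [hrowA, mem_rowFull]
    rintro ⟨hBmem, -, -⟩
    exact not_mem_take_self K hK t ht hBmem
  have hcond : (K[m] != K[t] && !((d.getD K[m] []).contains K[t])) = true := by
    have h1 : (K[m] != K[t]) = true := bne_iff_ne.mpr hAB
    have h2 : ((d.getD K[m] []).contains K[t]) = false := by
      rw [Bool.eq_false_iff]
      intro h
      exact hBnotin (List.contains_iff_mem.mp h)
    rw [h1, h2]
    rfl
  have hkeysmod : ∀ (d' : PySem.Dict (List (Int × Int)) (List (List (Int × Int))))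
      (X : List (Int × Int)) (f : List (List (Int × Int)) → List (List (Int × Int))),
      d'.keys = K → X ∈ K → (d'.modify X [] f).keys = K := by
    intro d' X f hk hX
    rw [PySem.Dict.keys_modify,
        PySem.Dict.keys_insert_of_contains _ _ ((PySem.Dict.contains_iff_mem_keys _ _).mpr (hk ▸ hX))]
    exact hk
  unfold stepB
  rw [if_pos hcond]
  by_cases hcf : cf K[m] K[t] = true
  · rw [if_pos hcf]
    refine ⟨?_, fun i h => ?_⟩
    · exact hkeysmod _ _ _ (hkeysmod _ _ _ hkeys (List.getElem_mem hm)) (List.getElem_mem ht)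
    · by_cases hit : i = t
      · subst hit
        rw [PySem.Dict.getD_modify_self, PySem.Dict.getD_modify_of_ne _ _ _ (Ne.symm hAB)]
        have hold := hrows i h
        rw [if_neg (by omega), if_neg (by omega), if_neg (by omega)] at hold
        rw [hold]
        rw [if_neg (by omega), if_neg (by omega), if_pos (by omega)]
        rw [cf_symm] at hcf
        rw [if_pos hcf]
      · have hiB : K[i] ≠ K[t] := fun he => hit (hK.getElem_inj_iff.mp he)
        rw [PySem.Dict.getD_modify_of_ne _ _ _ hiB]
        by_cases him : i = m
        · subst him
          rw [PySem.Dict.getD_modify_self, hrowA]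
          rw [if_neg (by omega), if_pos rfl]
          rw [take_succ_concat K t ht, rowFull_append]
          rw [if_pos ⟨Ne.symm hAB, hcf⟩]
        · have hiA : K[i] ≠ K[m] := fun he => him (hK.getElem_inj_iff.mp he)
          rw [PySem.Dict.getD_modify_of_ne _ _ _ hiA]
          have hold := hrows i h
          by_cases hlt : i < m
          · rw [if_pos hlt] at hold ⊢
            exact hold
          · rw [if_neg hlt, if_neg him] at hold ⊢
            by_cases hls : i < t
            · rw [if_pos hls] at hold
              rw [if_pos (by omega)]
              exact hold
            · rw [if_neg hls] at hold
              rw [if_neg (by omega)]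
              exact hold
  · rw [if_neg hcf]
    refine ⟨hkeys, fun i h => ?_⟩
    have hold := hrows i h
    by_cases hlt : i < m
    · rw [if_pos hlt] at hold ⊢
      exact hold
    · by_cases him : i = m
      · rw [if_neg hlt, if_pos him] at hold ⊢
        rw [hold, take_succ_concat K t ht, rowFull_append]
        subst him
        rw [if_neg (by rintro ⟨-, h2⟩; exact hcf h2), List.append_nil]
      · rw [if_neg hlt, if_neg him] at hold ⊢
        by_cases hit : i = t
        · subst hit
          rw [if_neg (by omega)] at hold
          rw [if_pos (by omega), hold]
          rw [cf_symm] at hcf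
          rw [if_neg hcf, List.append_nil]
        · by_cases hls : i < t
          · rw [if_pos hls] at hold
            rw [if_pos (by omega)]
            exact hold
          · rw [if_neg hls] at hold
            rw [if_neg (by omega)]
            exact hold


lemma innerInv_bump (K : List (List (Int × Int))) (m : Nat) (hm : m < K.length)
    (d : PySem.Dict (List (Int × Int)) (List (List (Int × Int))))
    (hd : InnerInv K K[m] m m d) : InnerInv K K[m] m (m+1) d := by
  obtain ⟨h1, h2⟩ := hd
  refine ⟨h1, fun i h => ?_⟩
  have hrow := h2 i h
  by_cases him : i < m
  · simpa [him] using hrow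
  · by_cases hieq : i = m
    · rw [if_neg him, if_pos hieq] at hrow ⊢
      rw [hrow, take_succ_concat K m hm, rowFull_append]
      simp
    · have h1' : ¬ i < m + 1 := by omega
      have h2' : ¬ i < m := him
      simp only [if_neg him, if_neg hieq, if_neg h1'] at hrow ⊢
      exact hrow


lemma ofList_prefix {Q L : List (List (Int × Int))} (h : Q <+: L) :
    PySem.Set.ofList Q <+: PySem.Set.ofList L := by
  obtain ⟨r, rfl⟩ := h
  rw [PySem.Set.ofList_append, PySem.Set.update_eq_append_filter]
  exact List.prefix_append _ _


lemma mem_take_mono (K : List (List (Int × Int))) (m n : Nat) (h : m ≤ n)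
    (x : List (Int × Int)) (hx : x ∈ K.take m) : x ∈ K.take n := by
  rw [List.mem_take_iff_getElem] at hx ⊢
  obtain ⟨j, hj, he⟩ := hx
  exact ⟨j, by omega, he⟩

lemma inner_loop (K : List (List (Int × Int))) (hK : K.Nodup) (m : Nat) (hm : m < K.length)
    (cliques : List ((List (Int × Int)) × String × Int))
    (hKc : K = PySem.Set.ofList (cliques.map (fun c => c.1))) :
    ∀ (rest pre : List ((List (Int × Int)) × String × Int)), cliques = pre ++ rest →
    ∀ (t : Nat), PySem.Set.ofList (pre.map (fun c => c.1)) = K.take t → t ≤ K.length →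
    ∀ (d : PySem.Dict (List (Int × Int)) (List (List (Int × Int)))),
      InnerInv K K[m] m (max m t) d →
      InnerInv K K[m] m K.length (rest.foldl (fun d c' => stepB K[m] d c'.1) d) := by
  intro rest
  induction rest with
  | nil =>
    intro pre hpre t ht htle d hd
    rw [List.append_nil] at hpre
    have hKt : K = K.take t := by conv_lhs => rw [hKc, hpre, ht]
    have hlen : K.length ≤ t := by
      have hl := congrArg List.length hKt
      rw [List.length_take] at hl
      omega
    have hmax : max m t = max m K.length := by omega
    have hmax2 : max m K.length = K.length := by omega
    rw [hmax, hmax2] at hd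
    simpa using hd
  | cons c rest ih =>
    intro pre hpre t ht htle d hd
    simp only [List.foldl_cons]
    have hpre' : cliques = (pre ++ [c]) ++ rest := by rw [hpre, List.append_assoc]; rfl
    by_cases hmem : c.1 ∈ PySem.Set.ofList (pre.map (fun c => c.1))
    · have hKtmem : c.1 ∈ K.take t := ht ▸ hmem
      have hstep : stepB K[m] d c.1 = d := by
        apply stepB_eq_self
        by_cases hAc : K[m] = c.1
        · exact Or.inl hAc
        · refine Or.inr (fun hcf => ?_)
          obtain ⟨hk, hrows⟩ := hd
          have hrowA : d.getD K[m] [] = rowFull (K.take (max m t)) K[m] := by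
            simpa using hrows m hm
          rw [hrowA, List.contains_iff_mem]
          apply (mem_rowFull _ _ _).mpr
          exact ⟨mem_take_mono K t (max m t) (le_max_right m t) _ hKtmem,
            fun h => hAc h.symm, hcf⟩
      rw [hstep]
      refine ih (pre ++ [c]) hpre' t ?_ htle d hd
      rw [List.map_append, List.map_cons, List.map_nil, PySem.Set.ofList_append_singleton, PySem.Set.add_of_mem hmem, ht]
    · have hofl : PySem.Set.ofList ((pre ++ [c]).map (fun c => c.1)) = K.take t ++ [c.1] := by
        rw [List.map_append, List.map_cons, List.map_nil, PySem.Set.ofList_append_singleton, PySem.Set.add_of_not_mem hmem, ht]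
      have hpref : PySem.Set.ofList ((pre ++ [c]).map (fun c => c.1)) <+: K := by
        rw [hKc]
        exact ofList_prefix (((List.prefix_append (pre ++ [c]) rest).trans
          (by rw [hpre'])).map (fun c => c.1))
      have hlen2 : t + 1 ≤ K.length := by
        have hl := hpref.length_le
        rw [hofl, List.length_append, List.length_take] at hl
        simp at hl
        omega
      have htlt : t < K.length := by omega
      have hct : c.1 = K[t] := by
        have h1 : K.take t ++ [c.1] = K.take (K.take t ++ [c.1]).length := by
          rw [← hofl]
          exact List.prefix_iff_eq_take.mp hpref
        rw [List.length_append, List.length_take, List.length_singleton] at h1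
        have hmin : min t K.length + 1 = t + 1 := by omega
        rw [hmin, take_succ_concat K t htlt] at h1
        have := List.append_cancel_left h1
        simpa using this
      rcases lt_trichotomy t m with hc1 | hc2 | hc3
      · have hstep : stepB K[m] d c.1 = d := by
          apply stepB_eq_self
          refine Or.inr (fun hcf => ?_)
          obtain ⟨hk, hrows⟩ := hd
          have hrowA : d.getD K[m] [] = rowFull (K.take (max m t)) K[m] := by
            simpa using hrows m hm
          rw [hrowA, List.contains_iff_mem]
          apply (mem_rowFull _ _ _).mpr
          refine ⟨?_, ?_, hcf⟩
          · rw [List.mem_take_iff_getElem]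
            exact ⟨t, by omega, hct.symm⟩
          · intro he
            rw [hct] at he
            exact absurd (hK.getElem_inj_iff.mp he) (by omega)
        rw [hstep]
        refine ih (pre ++ [c]) hpre' (t+1) ?_ (by omega) d ?_
        · rw [hofl, hct, ← take_succ_concat K t htlt]
        · have heq : max m t = max m (t+1) := by omega
          rwa [heq] at hd
      · have hstep : stepB K[m] d c.1 = d := by
          apply stepB_eq_self
          left
          subst hc2
          exact hct.symm
        rw [hstep]
        refine ih (pre ++ [c]) hpre' (t+1) ?_ (by omega) d ?_
        · rw [hofl, hct, ← take_succ_concat K t htlt]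
        · have hd' : InnerInv K K[m] m m d := by
            have heq : max m t = m := by omega
            rwa [heq] at hd
          have hb := innerInv_bump K m hm d hd'
          have heq2 : max m (t+1) = m + 1 := by omega
          rwa [heq2]
      · have heq : max m t = t := by omega
        rw [heq] at hd
        have hw := inner_work K hK m t hm htlt hc3 d hd
        rw [hct]
        refine ih (pre ++ [c]) hpre' (t+1) ?_ (by omega) _ ?_
        · rw [hofl, hct, ← take_succ_concat K t htlt]
        · have heq2 : max m (t+1) = t + 1 := by omega
          rwa [heq2]

lemma stepA_id (K : List (List (Int × Int))) (A : List (Int × Int))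
    (l : List ((List (Int × Int)) × String × Int))
    (hmem : ∀ c' ∈ l, c'.1 ∈ K)
    (d : PySem.Dict (List (Int × Int)) (List (List (Int × Int))))
    (hrow : ∀ B, ((d.getD A []).contains B = true ↔ (B ∈ K ∧ B ≠ A ∧ cf A B = true))) :
    l.foldl (fun d c' => stepB A d c'.1) d = d := by
  induction l generalizing d with
  | nil => rfl
  | cons c tl ih =>
    simp only [List.foldl_cons]
    have hstep : stepB A d c.1 = d := by
      apply stepB_eq_self
      by_cases hAB : A = c.1
      · exact Or.inl hAB
      · refine Or.inr (fun hcf => ?_)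
        rw [hrow]
        exact ⟨hmem c (List.mem_cons_self ..), fun h => hAB h.symm, hcf⟩
    rw [hstep]
    exact ih (fun c' hc' => hmem c' (List.mem_cons_of_mem _ hc')) d hrow


lemma outerInv_to_inner (K : List (List (Int × Int))) (m : Nat) (hm : m < K.length)
    (d : PySem.Dict (List (Int × Int)) (List (List (Int × Int))))
    (hd : OuterInv K m d) : InnerInv K K[m] m m d := by
  obtain ⟨hk, hrows⟩ := hd
  refine ⟨hk, fun i h => ?_⟩
  have hrow := hrows i h
  by_cases h1 : i < m
  · rw [if_pos h1] at hrow ⊢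
    exact hrow
  · rw [if_neg h1] at hrow
    by_cases h2 : i = m
    · rw [if_neg h1, if_pos h2]
      subst h2
      exact hrow
    · rw [if_neg h1, if_neg h2, if_neg (by omega)]
      exact hrow

lemma innerInv_to_outer (K : List (List (Int × Int))) (hK : K.Nodup) (m : Nat) (hm : m < K.length)
    (d : PySem.Dict (List (Int × Int)) (List (List (Int × Int))))
    (hd : InnerInv K K[m] m K.length d) : OuterInv K (m+1) d := by
  obtain ⟨hk, hrows⟩ := hd
  refine ⟨hk, fun i h => ?_⟩
  have hrow := hrows i h
  by_cases h1 : i < m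
  · rw [if_pos h1] at hrow
    rw [if_pos (by omega)]
    exact hrow
  · rw [if_neg h1] at hrow
    by_cases h2 : i = m
    · rw [if_pos h2] at hrow
      rw [if_pos (by omega), hrow, List.take_length]
      subst h2
      rfl
    · rw [if_neg h2, if_pos h] at hrow
      rw [if_neg (by omega), take_succ_concat K m hm, rowFull_append, hrow]
      have hne : K[m] ≠ K[i] := fun he => h2 ((hK.getElem_inj_iff.mp he).symm)
      by_cases hcf : cf K[i] K[m] = true
      · rw [if_pos hcf, if_pos ⟨hne, hcf⟩]
      · rw [if_neg hcf, if_neg (by rintro ⟨-, hx⟩; exact hcf hx), List.append_nil]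

lemma outer_loop (cliques : List ((List (Int × Int)) × String × Int)) :
    ∀ (rest pre : List ((List (Int × Int)) × String × Int)), cliques = pre ++ rest →
    ∀ (m : Nat),
      PySem.Set.ofList (pre.map (fun c => c.1)) =
        (PySem.List.dedup (cliques.map (fun c => c.1))).take m →
      m ≤ (PySem.List.dedup (cliques.map (fun c => c.1))).length →
    ∀ (d : PySem.Dict (List (Int × Int)) (List (List (Int × Int)))),
      OuterInv (PySem.List.dedup (cliques.map (fun c => c.1))) m d →
      OuterInv (PySem.List.dedup (cliques.map (fun c => c.1)))
        (PySem.List.dedup (cliques.map (fun c => c.1))).length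
        (rest.foldl (fun d c =>
          cliques.foldl (fun d c' => stepB c.1 d c'.1) d) d) := by
  have hKc : PySem.List.dedup (cliques.map (fun c => c.1))
      = PySem.Set.ofList (cliques.map (fun c => c.1)) := PySem.List.dedup_eq_ofList _
  have hK : (PySem.List.dedup (cliques.map (fun c => c.1))).Nodup := PySem.List.nodup_dedup _
  intro rest
  induction rest with
  | nil =>
    intro pre hpre m hm hmle d hd
    rw [List.append_nil] at hpre
    have hKt : PySem.List.dedup (cliques.map (fun c => c.1))
        = (PySem.List.dedup (cliques.map (fun c => c.1))).take m := by
      conv_lhs => rw [hKc, hpre, hm]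
    have hlen : (PySem.List.dedup (cliques.map (fun c => c.1))).length ≤ m := by
      have hl := congrArg List.length hKt
      rw [List.length_take] at hl
      omega
    have hmeq : m = (PySem.List.dedup (cliques.map (fun c => c.1))).length := by omega
    subst hmeq
    simpa using hd
  | cons c rest ih =>
    intro pre hpre m hm hmle d hd
    simp only [List.foldl_cons]
    have hpre' : cliques = (pre ++ [c]) ++ rest := by rw [hpre, List.append_assoc]; rfl
    by_cases hmem : c.1 ∈ PySem.Set.ofList (pre.map (fun c => c.1))
    · have hid : cliques.foldl (fun d c' => stepB c.1 d c'.1) d = d := by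
        refine stepA_id (PySem.List.dedup (cliques.map (fun c => c.1))) c.1 cliques (fun c' hc' => ?_) d (fun B => ?_)
        · rw [PySem.List.dedup_eq_ofList, PySem.Set.mem_ofList]
          exact List.mem_map_of_mem hc'
        · obtain ⟨hk, hrows⟩ := hd
          have hctake : c.1 ∈ (PySem.List.dedup (cliques.map (fun c => c.1))).take m := hm ▸ hmem
          rw [List.mem_take_iff_getElem] at hctake
          obtain ⟨i, hi, hie⟩ := hctake
          have hi2 : i < (PySem.List.dedup (cliques.map (fun c => c.1))).length := by omega
          have hrowc : d.getD c.1 [] = rowFull (PySem.List.dedup (cliques.map (fun c => c.1))) c.1 := by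
            have hr := hrows i hi2
            rw [if_pos (by omega)] at hr
            rw [← hie]
            exact hr
          rw [hrowc, List.contains_iff_mem, mem_rowFull]
      rw [hid]
      refine ih (pre ++ [c]) hpre' m ?_ hmle d hd
      rw [List.map_append, List.map_cons, List.map_nil, PySem.Set.ofList_append_singleton,
          PySem.Set.add_of_mem hmem, hm]
    · have hofl : PySem.Set.ofList ((pre ++ [c]).map (fun c => c.1))
          = (PySem.List.dedup (cliques.map (fun c => c.1))).take m ++ [c.1] := by
        rw [List.map_append, List.map_cons, List.map_nil, PySem.Set.ofList_append_singleton,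
            PySem.Set.add_of_not_mem hmem, hm]
      have hpref : PySem.Set.ofList ((pre ++ [c]).map (fun c => c.1))
          <+: PySem.List.dedup (cliques.map (fun c => c.1)) := by
        rw [hKc]
        exact ofList_prefix (((List.prefix_append (pre ++ [c]) rest).trans
          (by rw [hpre'])).map (fun c => c.1))
      have hlen2 : m + 1 ≤ (PySem.List.dedup (cliques.map (fun c => c.1))).length := by
        have hl := hpref.length_le
        rw [hofl, List.length_append, List.length_take, List.length_singleton] at hl
        omega
      have hmlt : m < (PySem.List.dedup (cliques.map (fun c => c.1))).length := by omega
      have hcm : c.1 = (PySem.List.dedup (cliques.map (fun c => c.1)))[m] := by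
        have h1 : (PySem.List.dedup (cliques.map (fun c => c.1))).take m ++ [c.1]
            = (PySem.List.dedup (cliques.map (fun c => c.1))).take
                ((PySem.List.dedup (cliques.map (fun c => c.1))).take m ++ [c.1]).length := by
          rw [← hofl]
          exact List.prefix_iff_eq_take.mp hpref
        rw [List.length_append, List.length_take, List.length_singleton] at h1
        have hmin : min m (PySem.List.dedup (cliques.map (fun c => c.1))).length + 1 = m + 1 := by
          omega
        rw [hmin, take_succ_concat _ m hmlt] at h1
        have := List.append_cancel_left h1
        simpa using this
      have hinner := inner_loop (PySem.List.dedup (cliques.map (fun c => c.1))) hK m hmlt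
        cliques hKc cliques [] rfl 0 (by simp) (by omega) d
        (by
          have h0 : max m 0 = m := by omega
          rw [h0]
          exact outerInv_to_inner _ m hmlt d hd)
      have houter := innerInv_to_outer _ hK m hmlt _ hinner
      rw [hcm]
      refine ih (pre ++ [c]) hpre' (m+1) ?_ (by omega) _ houter
      rw [hofl, hcm, ← take_succ_concat _ m hmlt]


lemma a_eq (cliques : List ((List (Int × Int)) × String × Int)) :
    gneighbors cliques =
      (PySem.List.dedup (cliques.map (fun c => c.1))).map
        (fun M => (M, rowFull (PySem.List.dedup (cliques.map (fun c => c.1))) M)) := by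
  have hg : gneighbors cliques
      = (cliques.foldl (fun d c => cliques.foldl (fun d c' => stepB c.1 d c'.1) d)
          (cliques.foldl (fun d c => d.insert c.1 []) PySem.Dict.empty)).items := by
    unfold gneighbors stepB
    simp only [conflicting_eq]
  rw [hg]
  have hd0 : OuterInv (PySem.List.dedup (cliques.map (fun c => c.1))) 0
      (cliques.foldl (fun d c => d.insert c.1 []) PySem.Dict.empty) := by
    refine ⟨phase1_keys cliques, fun i h => ?_⟩
    rw [phase1_getD, if_neg (by omega)]
    simp [rowFull]
  have houter := outer_loop cliques cliques [] rfl 0 (by simp) (by omega) _ hd0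
  obtain ⟨hk, hrows⟩ := houter
  have hnd : (cliques.foldl (fun d c => cliques.foldl (fun d c' => stepB c.1 d c'.1) d)
      (cliques.foldl (fun d c => d.insert c.1 []) PySem.Dict.empty)).keys.Nodup := by
    rw [hk]
    exact PySem.List.nodup_dedup _
  rw [PySem.Dict.items_eq_map_keys _ hnd [], hk]
  refine List.map_congr_left (fun M hM => ?_)
  obtain ⟨i, hi, rfl⟩ := List.mem_iff_getElem.mp hM
  have hr := hrows i hi
  rw [if_pos hi] at hr
  rw [hr]


-- ===== VERDICT (by name: the statement is the Claim_ definition above) =====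
theorem gneighbors_spec : Claim_equal_gneighbors := by
  intro cliques _
  unfold Spec_gneighbors
  rw [a_eq, alt_eq]
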